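-- pv_equiv track=rewrite | github.com/tarunjais28/solana-lottery | deploy-scripts/lib/env.py | parse_export
-- ===== SOURCE A (Python) =====
-- def parse_export(line: str, env: dict[str, str] = {}):
--     if not line.startswith("export "):
--         return None, f"Line doesn't start with export: {line}"
--
--     line = line[len("export ") :]
--     line = line.strip()
--
--     name, *rest = line.split("=", 1)
--     rest = rest[0]
--
--     val = ""
--     var = ""
--     comment = ""
--
--     in_quote = False
--     in_var = False
--     has_unquoted_space = False
--
--     i = 0
--     while True:
--         if i < len(rest):
--             c = rest[i]
--         elif i == len(rest):
--             c = ""  # sentinel value to trigger cleanup of in_var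
--         else:
--             break
--
--         if not in_var:
--             if c == " " and not in_quote:
--                 has_unquoted_space = True
--             elif c == "$":
--                 in_var = True
--             elif c == '"':
--                 in_quote = not in_quote
--             elif c == "#":
--                 comment = rest[i + 1 :].strip()
--                 break
--             elif has_unquoted_space:
--                 return None, "Unquoted space"
--             else:
--                 val += c
--             i += 1
--         else:
--             if c.isalnum() or c == "_":
--                 var += c
--                 i += 1
--             else:
--                 # no i += 1.
--                 # character is not advanced so that it can be consumed by the
--                 # next iteration.
--                 in_var = False
--                 if var in env:
--                     var_res = env[var]
--                     if not in_quote and " " in var_res: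
--                         return (
--                             None,
--                             f"Variable ${var}'s value ({var_res}) contains space, but is not quoted",
--                         )
--                     val += var_res
--                     var = ""
--                 else:
--                     return None, f"Unknown variable ${var}"
--     return {"name": name, "value": val, "comment": comment}, None
-- ===== SOURCE B (Python) =====
-- def parse_export(line: str, env: dict[str, str] = {}):
--     if not line.startswith("export "):
--         return None, f"Line doesn't start with export: {line}"
--     body = line[len("export "):].strip()
--     name, eq, rest = body.partition("=")
--     if not eq:
--         # A raises IndexError here; B reports the problem instead.
--         return None, "Missing '='"
--     val = ""
--     comment = ""
--     in_quote = False
--     pending_space = False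
--     n = len(rest)
--     i = 0
--     while i <= n:
--         if i == n:
--             # end of input behaves like a plain value character for the
--             # deferred unquoted-space error, then parsing finishes
--             if pending_space:
--                 return None, "Unquoted space"
--             break
--         c = rest[i]
--         if c == "#":
--             comment = rest[i + 1:].strip()
--             break
--         elif c == '"':
--             in_quote = not in_quote
--             i += 1
--         elif c == " " and not in_quote:
--             pending_space = True
--             i += 1
--         elif c == "$":
--             j = i + 1
--             while j < n and (rest[j].isalnum() or rest[j] == "_"):
--                 j += 1
--             var = rest[i + 1:j]
--             if var not in env:
--                 return None, f"Unknown variable ${var}"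
--             var_res = env[var]
--             if not in_quote and " " in var_res:
--                 return None, f"Variable ${var}'s value ({var_res}) contains space, but is not quoted"
--             val += var_res
--             i = j
--         elif pending_space:
--             return None, "Unquoted space"
--         else:
--             val += c
--             i += 1
--     return {"name": name, "value": val, "comment": comment}, None
-- ===== Notes on version B (the rewrite author's own statement) =====
-- stated objective: alternative
-- what changed: B replaces A's flat single-index state machine (in_var flag, '' sentinel, no-advance rewind) with a structured scan: str.partition for the name/value split and an inner while loop that consumes a $variable name in one go, flushing end-of-string variables without any sentinel.
-- outside the precondition, e.g. on parse_export('export A', {}): A raises IndexError, B returns (None, "Missing '='")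
-- crash fix: On lines that start with 'export ' but contain no '=' afterwards, A raises IndexError (rest[0] on an empty split tail); B returns (None, "Missing '='"). — e.g. on parse_export("export A", []): A raises IndexError, B returns (none, some "Missing '='")
import Mathlib
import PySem

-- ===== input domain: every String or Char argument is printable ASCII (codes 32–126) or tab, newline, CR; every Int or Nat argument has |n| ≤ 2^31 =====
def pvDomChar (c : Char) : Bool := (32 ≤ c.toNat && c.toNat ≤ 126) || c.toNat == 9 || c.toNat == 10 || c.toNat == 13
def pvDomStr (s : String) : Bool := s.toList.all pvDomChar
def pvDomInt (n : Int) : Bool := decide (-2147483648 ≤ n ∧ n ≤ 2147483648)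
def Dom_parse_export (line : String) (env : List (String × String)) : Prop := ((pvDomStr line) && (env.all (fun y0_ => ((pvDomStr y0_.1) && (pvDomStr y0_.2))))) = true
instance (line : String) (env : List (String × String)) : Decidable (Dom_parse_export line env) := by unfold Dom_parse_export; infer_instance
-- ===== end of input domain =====

-- B re-decomposes A's flat sentinel-driven state machine into a structured scan (an inner loop
-- consumes a $variable name); return values are identical wherever A returns (A raises IndexError
-- when an "export " line has no '='; B returns an error tuple there — see Raises_).

-- ===== PORT A =====

-- Python: c.isalnum() or c == "_", where c may be the "" sentinel (then False)
def pvAlnumOpt (c? : Option Char) : Bool :=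
  match c? with
  | some c => PySem.Chars.isalnum c || c = '_'
  | none => false

-- A's `while True` loop; i ranges over 0..len(rest) (i = len is the "" sentinel), i > len breaks.
def parseLoopA (envd : PySem.Dict String String) (rest : List Char) (name : String)
    (val var comment : List Char) (in_quote in_var has_sp : Bool) (i : Nat) :
    (Option (List (String × String))) × Option String :=
  if h : i ≤ rest.length then
    let c? : Option Char := rest[i]?   -- none = the "" sentinel at i = len(rest)
    if in_var = false then
      if c? = some ' ' ∧ in_quote = false then   -- c == " " and not in_quote
        parseLoopA envd rest name val var comment in_quote in_var true (i+1)
      else if c? = some '$' then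
        parseLoopA envd rest name val var comment in_quote true has_sp (i+1)
      else if c? = some '"' then
        parseLoopA envd rest name val var comment (!in_quote) in_var has_sp (i+1)
      else if c? = some '#' then
        -- comment = rest[i+1:].strip(); break; then the final return
        (some [("name", name), ("value", String.ofList val),
               ("comment", String.ofList (PySem.Chars.strip (rest.drop (i+1))))], none)
      else if has_sp then
        (none, some "Unquoted space")
      else
        -- val += c  (appends nothing for the sentinel)
        parseLoopA envd rest name (val ++ c?.toList) var comment in_quote in_var has_sp (i+1)
    else
      if pvAlnumOpt c? = true then
        parseLoopA envd rest name val (var ++ c?.toList) comment in_quote in_var has_sp (i+1)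
      else
        -- cleanup: i is NOT advanced
        match PySem.Dict.get? envd (String.ofList var) with
        | some var_res =>
          if in_quote = false ∧ PySem.Chars.isIn [' '] var_res.toList = true then
            (none, some (String.ofList ("Variable $".toList ++ var ++ "'s value (".toList
                          ++ var_res.toList ++ ") contains space, but is not quoted".toList)))
          else
            parseLoopA envd rest name (val ++ var_res.toList) [] comment in_quote false has_sp i
        | none => (none, some (String.ofList ("Unknown variable $".toList ++ var)))
  else
    (some [("name", name), ("value", String.ofList val), ("comment", String.ofList comment)], none)
termination_by (rest.length + 1 - i) * 2 + (if in_var then 1 else 0)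
decreasing_by all_goals first | (simp_all; omega) | simp_all

def parse_export (line : String) (env : List (String × String)) :
    (Option (List (String × String))) × Option String :=
  if PySem.Chars.startswith line.toList "export ".toList = false then
    (none, some (String.ofList ("Line doesn't start with export: ".toList ++ line.toList)))
  else
    -- line = line[len("export "):] ; line = line.strip()
    let body := PySem.Chars.strip (PySem.List.slice line.toList (some 7) none)
    -- name, *rest = line.split("=", 1); rest = rest[0]
    match PySem.Chars.splitOnMax body ['='] 1 with
    | [name, rest] =>
        parseLoopA (PySem.Dict.ofList env) rest (String.ofList name) [] [] [] false false false 0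
    | _ => (none, none)   -- no '=': Python raises IndexError here (excluded by Pre_)

-- ===== PORT B =====

-- Source B: body.partition("="): none = separator absent, some (before, after)
def pvPartition : List Char → Option (List Char × List Char)
  | [] => none
  | c :: cs =>
    if c = '=' then some ([], cs)
    else match pvPartition cs with
         | none => none
         | some (a, b) => some (c :: a, b)

-- Source B's inner `while j < n and (rest[j].isalnum() or rest[j] == "_"): j += 1`
def innerVarEnd (rest : List Char) (j : Nat) : Nat :=
  if h : j < rest.length then
    if PySem.Chars.isalnum rest[j] = true ∨ rest[j] = '_' then innerVarEnd rest (j+1) else j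
  else j
termination_by rest.length - j

theorem innerVarEnd_ge (rest : List Char) (j : Nat) : j ≤ innerVarEnd rest j := by
  fun_induction innerVarEnd rest j with
  | case1 j h halnum ih => omega
  | case2 j h halnum => omega
  | case3 j h => omega


-- Source B's outer `while i <= n` loop
def parseLoopB (envd : PySem.Dict String String) (rest : List Char) (name : String)
    (val comment : List Char) (in_quote pending : Bool) (i : Nat) :
    (Option (List (String × String))) × Option String :=
  if h : i ≤ rest.length then
    if h2 : i = rest.length then
      -- end of input: the deferred unquoted-space error, then the final return
      if pending then (none, some "Unquoted space")
      else (some [("name", name), ("value", String.ofList val), ("comment", String.ofList comment)], none)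
    else
      let c := rest[i]'(by omega)
      if c = '#' then
        (some [("name", name), ("value", String.ofList val),
               ("comment", String.ofList (PySem.Chars.strip (rest.drop (i+1))))], none)
      else if c = '"' then
        parseLoopB envd rest name val comment (!in_quote) pending (i+1)
      else if c = ' ' ∧ in_quote = false then   -- c == " " and not in_quote
        parseLoopB envd rest name val comment in_quote true (i+1)
      else if c = '$' then
        let j := innerVarEnd rest (i+1)
        let var := (rest.drop (i+1)).take (j - (i+1))   -- rest[i+1:j]
        match PySem.Dict.get? envd (String.ofList var) with
        | none => (none, some (String.ofList ("Unknown variable $".toList ++ var)))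
        | some var_res =>
          if in_quote = false ∧ PySem.Chars.isIn [' '] var_res.toList = true then
            (none, some (String.ofList ("Variable $".toList ++ var ++ "'s value (".toList
                          ++ var_res.toList ++ ") contains space, but is not quoted".toList)))
          else
            parseLoopB envd rest name (val ++ var_res.toList) comment in_quote pending j
      else if pending then (none, some "Unquoted space")
      else
        parseLoopB envd rest name (val ++ [c]) comment in_quote pending (i+1)
  else   -- while-condition false (unreachable: i never exceeds n+0); the final return
    (some [("name", name), ("value", String.ofList val), ("comment", String.ofList comment)], none)
termination_by rest.length + 1 - i
decreasing_by
  · omega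
  · omega
  · have := innerVarEnd_ge rest (i+1); omega
  · omega

def parse_export_alt (line : String) (env : List (String × String)) :
    (Option (List (String × String))) × Option String :=
  if PySem.Chars.startswith line.toList "export ".toList = false then
    (none, some (String.ofList ("Line doesn't start with export: ".toList ++ line.toList)))
  else
    let body := PySem.Chars.strip (PySem.List.slice line.toList (some 7) none)
    match pvPartition body with
    | none => (none, some "Missing '='")
    | some (name, rest) =>
        parseLoopB (PySem.Dict.ofList env) rest (String.ofList name) [] [] false false 0

-- ===== PRECONDITION & SPEC =====
-- Pre_ excludes lines starting with "export " whose remainder has no '=': A raises IndexError there.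
def Pre_parse_export (line : String) (env : List (String × String)) : Prop :=
  PySem.Chars.startswith line.toList "export ".toList = true →
    PySem.Chars.isIn ['='] (PySem.Chars.strip (PySem.List.slice line.toList (some 7) none)) = true

instance (line : String) (env : List (String × String)) : Decidable (Pre_parse_export line env) := by
  unfold Pre_parse_export; infer_instance

def pvWitness_parse_export : String × (List (String × String)) := ("export A=$X", [("X", "1")])

-- On lines that start with "export " but contain no '=' afterwards, A raises IndexError; B returns (None, "Missing '='").
def Raises_parse_export (line : String) (env : List (String × String)) : Prop :=
  PySem.Chars.startswith line.toList "export ".toList = true ∧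
    PySem.Chars.isIn ['='] (PySem.Chars.strip (PySem.List.slice line.toList (some 7) none)) = false

instance (line : String) (env : List (String × String)) : Decidable (Raises_parse_export line env) := by
  unfold Raises_parse_export; infer_instance

def pvRaiseWitness_parse_export : String × (List (String × String)) := ("export A", [])
def pvRaiseWitnessOut_parse_export : (Option (List (String × String))) × Option String :=
  (none, some "Missing '='")

def Spec_parse_export (line : String) (env : List (String × String))
    (out : (Option (List (String × String))) × Option String) : Prop := out = parse_export_alt line env
instance (line : String) (env : List (String × String))
    (out : (Option (List (String × String))) × Option String) : Decidable (Spec_parse_export line env out) := by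
  unfold Spec_parse_export; infer_instance

-- ===== CLAIM (what is proved, stated in full; the proofs are below) =====
def Claim_equal_parse_export : Prop := ∀ (line : String) (env : List (String × String)), Dom_parse_export line env → Pre_parse_export line env → Spec_parse_export line env (parse_export line env)
def Claim_raises_parse_export : Prop := (∀ (line : String) (env : List (String × String)), Dom_parse_export line env → Raises_parse_export line env → ¬ Pre_parse_export line env) ∧ (Dom_parse_export (pvRaiseWitness_parse_export.1) (pvRaiseWitness_parse_export.2) ∧ Raises_parse_export (pvRaiseWitness_parse_export.1) (pvRaiseWitness_parse_export.2) ∧ parse_export_alt (pvRaiseWitness_parse_export.1) (pvRaiseWitness_parse_export.2) = pvRaiseWitnessOut_parse_export)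

-- ===== LEMMAS AND PROOFS =====

theorem innerVarEnd_le (rest : List Char) (j : Nat) (hj : j ≤ rest.length) :
    innerVarEnd rest j ≤ rest.length := by
  fun_induction innerVarEnd rest j with
  | case1 j h halnum ih => exact ih (by omega)
  | case2 j h halnum => omega
  | case3 j h => omega

-- one cleanup step at end of input (the "" sentinel, i = len)
theorem innerVarEnd_at_end (rest : List Char) : innerVarEnd rest rest.length = rest.length := by
  rw [innerVarEnd]; simp

-- A's var-collection phase, characterised through B's inner-loop endpoint innerVarEnd
theorem varPhase (envd : PySem.Dict String String) (rest : List Char) (name : String)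
    (val comment : List Char) (q sp : Bool) :
    ∀ (m k : Nat) (acc : List Char), rest.length - k ≤ m → k ≤ rest.length →
    parseLoopA envd rest name val acc comment q true sp k =
      (let j := innerVarEnd rest k
       let var := acc ++ (rest.drop k).take (j - k)
       match PySem.Dict.get? envd (String.ofList var) with
       | none => (none, some (String.ofList ("Unknown variable $".toList ++ var)))
       | some var_res =>
         if q = false ∧ PySem.Chars.isIn [' '] var_res.toList = true then
           (none, some (String.ofList ("Variable $".toList ++ var ++ "'s value (".toList
                         ++ var_res.toList ++ ") contains space, but is not quoted".toList)))
         else parseLoopA envd rest name (val ++ var_res.toList) [] comment q false sp j) := by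
  intro m
  induction m with
  | zero =>
    intro k acc hm hk
    have hkl : k = rest.length := by omega
    subst hkl
    rw [parseLoopA]
    simp only [innerVarEnd_at_end, List.getElem?_eq_none (le_refl rest.length),
      dif_pos (le_refl rest.length), Nat.sub_self, List.take_zero, List.append_nil, pvAlnumOpt]
    cases hget : envd.get? (String.ofList acc) <;> simp [hget]
  | succ m ihm =>
    intro k acc hm hk
    by_cases hlt : k < rest.length
    · rw [parseLoopA]
      simp only [dif_pos hk, List.getElem?_eq_getElem hlt, pvAlnumOpt]
      rw [if_neg (by simp : ¬ (true = false))]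
      by_cases halnum : (PySem.Chars.isalnum rest[k] || decide (rest[k] = '_')) = true
      · have h' : PySem.Chars.isalnum rest[k] = true ∨ rest[k] = '_' := by simpa using halnum
        rw [if_pos halnum]
        simp only [Option.toList_some]
        rw [ihm (k+1) (acc ++ [rest[k]]) (by omega) (by omega)]
        have hj : innerVarEnd rest k = innerVarEnd rest (k+1) := by
          rw [innerVarEnd]; simp [hlt, h']
        have hge : k + 1 ≤ innerVarEnd rest (k+1) := innerVarEnd_ge rest (k+1)
        have hvar : acc ++ [rest[k]] ++ (rest.drop (k+1)).take (innerVarEnd rest (k+1) - (k+1))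
            = acc ++ (rest.drop k).take (innerVarEnd rest (k+1) - k) := by
          rw [List.drop_eq_getElem_cons hlt]
          have h2 : innerVarEnd rest (k+1) - k = (innerVarEnd rest (k+1) - (k+1)) + 1 := by omega
          rw [h2, List.take_succ_cons, List.append_assoc]
          rfl
        simp only [hj]
        rw [← hvar]
      · have h' : ¬ (PySem.Chars.isalnum rest[k] = true ∨ rest[k] = '_') := by
          simpa using halnum
        rw [if_neg halnum]
        have hj : innerVarEnd rest k = k := by
          rw [innerVarEnd]; simp [hlt, h']
        simp only [hj, Nat.sub_self, List.take_zero, List.append_nil]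
        cases hget : envd.get? (String.ofList acc) <;> simp [hget]
    · have hkl : k = rest.length := by omega
      subst hkl
      rw [parseLoopA]
      simp only [innerVarEnd_at_end, List.getElem?_eq_none (le_refl rest.length),
        dif_pos (le_refl rest.length), Nat.sub_self, List.take_zero, List.append_nil, pvAlnumOpt]
      cases hget : envd.get? (String.ofList acc) <;> simp [hget]

-- the two loops at end of input (i = len: A sees the "" sentinel, B its i == n test)
theorem loopsEnd (envd : PySem.Dict String String) (rest : List Char) (name : String)
    (val comment : List Char) (q sp : Bool) :
    parseLoopA envd rest name val [] comment q false sp rest.length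
      = parseLoopB envd rest name val comment q sp rest.length := by
  rw [parseLoopA, parseLoopB]
  simp only [dif_pos (le_refl rest.length), List.getElem?_eq_none (le_refl rest.length),
    dif_pos rfl]
  cases sp with
  | true => simp
  | false =>
    have hstep : parseLoopA envd rest name val [] comment q false false (rest.length + 1)
        = (some [("name", name), ("value", String.ofList val),
                 ("comment", String.ofList comment)], none) := by
      rw [parseLoopA]
      simp [show ¬ (rest.length + 1 ≤ rest.length) from by omega]
    simp [hstep]

theorem loopsAux (envd : PySem.Dict String String) (rest : List Char) (name : String) :
    ∀ (m : Nat) (val comment : List Char) (q sp : Bool) (i : Nat),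
    rest.length - i ≤ m → i ≤ rest.length →
    parseLoopA envd rest name val [] comment q false sp i
      = parseLoopB envd rest name val comment q sp i := by
  intro m
  induction m with
  | zero =>
    intro val comment q sp i hm hi
    have h0 : i = rest.length := by omega
    subst h0
    exact loopsEnd envd rest name val comment q sp
  | succ m ihm =>
    intro val comment q sp i hm hi
    by_cases hlt : i < rest.length
    · have hgi : rest[i]? = some rest[i] := List.getElem?_eq_getElem hlt
      rw [parseLoopA, parseLoopB]
      simp only [dif_pos hi, dif_neg (by omega : ¬ i = rest.length), hgi]
      simp only [if_true]
      by_cases hsp : rest[i] = ' ' ∧ q = false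
      · rw [if_pos (show (some rest[i] = some ' ') ∧ q = false from ⟨by rw [hsp.1], hsp.2⟩),
          if_neg (by simp [hsp.1] : ¬ rest[i] = '#'),
          if_neg (by simp [hsp.1] : ¬ rest[i] = '"'), if_pos hsp]
        exact ihm val comment q true (i+1) (by omega) (by omega)
      · have hspA : ¬ ((some rest[i] = some ' ') ∧ q = false) := by
          intro h; exact hsp ⟨by simpa using h.1, h.2⟩
        rw [if_neg hspA]
        by_cases hdol : rest[i] = '$'
        · rw [if_pos (by rw [hdol]), if_neg (by simp [hdol] : ¬ rest[i] = '#'),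
            if_neg (by simp [hdol] : ¬ rest[i] = '"'), if_neg hsp, if_pos hdol]
          rw [varPhase envd rest name val comment q sp rest.length (i+1) [] (by omega) (by omega)]
          have hge : i + 1 ≤ innerVarEnd rest (i+1) := innerVarEnd_ge rest (i+1)
          have hle : innerVarEnd rest (i+1) ≤ rest.length := innerVarEnd_le rest (i+1) (by omega)
          simp only [List.nil_append]
          cases hget : envd.get? (String.ofList ((rest.drop (i+1)).take (innerVarEnd rest (i+1) - (i+1)))) with
          | none => simp [hget]
          | some var_res =>
            simp only [hget]
            by_cases hq2 : q = false ∧ PySem.Chars.isIn [' '] var_res.toList = true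
            · rw [if_pos hq2, if_pos hq2]
            · rw [if_neg hq2, if_neg hq2]
              exact ihm (val ++ var_res.toList) comment q sp (innerVarEnd rest (i+1))
                (by omega) (by omega)
        · rw [if_neg (by simpa using hdol)]
          by_cases hquo : rest[i] = '"'
          · rw [if_pos (by rw [hquo]), if_neg (by simp [hquo] : ¬ rest[i] = '#'), if_pos hquo]
            exact ihm val comment (!q) sp (i+1) (by omega) (by omega)
          · rw [if_neg (by simpa using hquo)]
            by_cases hhash : rest[i] = '#'
            · rw [if_pos (by rw [hhash]), if_pos hhash]
            · rw [if_neg (by simpa using hhash), if_neg hhash, if_neg hquo, if_neg hdol,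
                if_neg hsp]
              cases sp with
              | true => simp
              | false =>
                simp only [Bool.false_eq_true, if_false, Option.toList_some]
                exact ihm (val ++ [rest[i]]) comment q false (i+1) (by omega) (by omega)
    · have h0 : i = rest.length := by omega
      subst h0
      exact loopsEnd envd rest name val comment q sp

theorem loops_agree (envd : PySem.Dict String String) (rest : List Char) (name : String)
    (val comment : List Char) (q sp : Bool) (i : Nat) (hi : i ≤ rest.length) :
    parseLoopA envd rest name val [] comment q false sp i
      = parseLoopB envd rest name val comment q sp i :=
  loopsAux envd rest name rest.length val comment q sp i (by omega) hi

theorem go_msplit_zero (fuel : Nat) (l cur : List Char) (accs : List (List Char)) :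
    PySem.Chars.splitOnMax.go ['='] fuel 0 l cur accs = ((cur.reverse ++ l) :: accs).reverse := by
  cases fuel with
  | zero => simp [PySem.Chars.splitOnMax.go]
  | succ f => cases l <;> simp [PySem.Chars.splitOnMax.go]

theorem go_msplit_one (l : List Char) : ∀ (fuel : Nat) (cur : List Char) (accs : List (List Char)),
    l.length < fuel →
    PySem.Chars.splitOnMax.go ['='] fuel 1 l cur accs =
      (match pvPartition l with
       | none => ((cur.reverse ++ l) :: accs).reverse
       | some (a, b) => (b :: (cur.reverse ++ a) :: accs).reverse) := by
  induction l with
  | nil =>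
    intro fuel cur accs h
    match fuel, h with
    | f + 1, _ => simp [PySem.Chars.splitOnMax.go, pvPartition]
  | cons c rest ih =>
    intro fuel cur accs h
    match fuel, h with
    | f + 1, h =>
      by_cases hc : c = '='
      · subst hc
        simp only [PySem.Chars.splitOnMax.go, List.isPrefixOf, pvPartition]
        rw [go_msplit_zero]
        simp
      · have hpre : List.isPrefixOf ['='] (c :: rest) = false := by
          simp [List.isPrefixOf]; exact fun h' => (hc h'.symm).elim
        rw [PySem.Chars.splitOnMax.go]
        simp only [hpre, if_false, if_neg (by omega : ¬ (1:Nat) = 0)]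
        rw [ih f (c :: cur) accs (by simpa using h)]
        simp only [pvPartition, if_neg hc]
        cases hp : pvPartition rest with
        | none => simp
        | some p => cases p with | mk a b => simp

theorem split_partition (cs : List Char) (a b : List Char) (h : pvPartition cs = some (a, b)) :
    PySem.Chars.splitOnMax cs ['='] 1 = [a, b] := by
  unfold PySem.Chars.splitOnMax
  rw [if_neg (by omega : ¬ (1:Int) < 0)]
  have h1 : (1:Int).toNat = 1 := rfl
  rw [h1, go_msplit_one cs (cs.length + 1) [] [] (by omega)]
  simp [h]

theorem partition_none_iff (cs : List Char) : pvPartition cs = none ↔ '=' ∉ cs := by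
  induction cs with
  | nil => simp [pvPartition]
  | cons c cs ih =>
    simp only [pvPartition, List.mem_cons]
    by_cases hc : c = '='
    · simp [hc]
    · cases hp : pvPartition cs with
      | none =>
        simp only [hp] at ih
        simp [hc, hp]
        constructor
        · exact fun h => (hc h.symm)
        · exact ih.mp trivial
      | some p =>
        simp only [hp] at ih
        have hmem : '=' ∈ cs := by
          by_contra hn
          exact absurd (ih.mpr hn) (by simp)
        simp [hc, hp, hmem]

-- ===== VERDICT (by name: the statement is the Claim_ definition above) =====
theorem parse_export_spec : Claim_equal_parse_export := by
  intro line env _ hpre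
  unfold Spec_parse_export parse_export parse_export_alt
  by_cases hs : PySem.Chars.startswith line.toList "export ".toList = false
  · rw [if_pos hs, if_pos hs]
  · rw [if_neg hs, if_neg hs]
    have hst : PySem.Chars.startswith line.toList "export ".toList = true := by
      revert hs; cases PySem.Chars.startswith line.toList "export ".toList <;> simp
    have hin := hpre hst
    have hmem : '=' ∈ PySem.Chars.strip (PySem.List.slice line.toList (some 7) none) := by
      have h1 := (PySem.Chars.isIn_iff_infix _ _).mp hin
      exact h1.subset (List.mem_singleton_self '=')
    obtain ⟨a, b, hp⟩ : ∃ a b,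
        pvPartition (PySem.Chars.strip (PySem.List.slice line.toList (some 7) none))
          = some (a, b) := by
      cases hpp : pvPartition (PySem.Chars.strip (PySem.List.slice line.toList (some 7) none)) with
      | none => exact absurd ((partition_none_iff _).mp hpp) (by simpa using hmem)
      | some p => exact ⟨p.1, p.2, by simp [hpp]⟩
    simp only [split_partition _ a b hp, hp]
    exact loops_agree (PySem.Dict.ofList env) b (String.ofList a) [] [] false false 0
      (by omega)

@[simp] theorem parse_export_raises : Claim_raises_parse_export := by
  unfold Claim_raises_parse_export
  refine ⟨?_, by decide⟩
  intro line env _ hr hpre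
  rcases hr with ⟨h1, h2⟩
  rw [hpre h1] at h2
  simp at h2
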